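-- pv_equiv track=rewrite | github.com/happynow7/Algorithm | 프로그래머스/0/120853. 컨트롤 제트/컨트롤 제트.py | solution
-- ===== SOURCE A (Python) =====
-- def solution(s):
--     answer = 0
--     l = s.split(' ')
--     stack = []
--
--     for i in range(len(l)):
--         if l[i] == 'Z':
--             if stack:
--                 stack.pop()
--         else:
--             stack.append(int(l[i]))
--     answer = sum(stack)
--     return answer
-- ===== SOURCE B (Python) =====
-- def solution(s):
--     answer = 0
--     skip = 0
--     for token in reversed(s.split(' ')):
--         if token == 'Z':
--             skip += 1
--         else:
--             v = int(token)
--             if skip > 0: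
--                 skip -= 1
--             else:
--                 answer += v
--     return answer
-- ===== Notes on version B (the rewrite author's own statement) =====
-- stated objective: alternative
-- what changed: Single reverse pass with a pending-cancellation counter and a running sum replaces the explicit stack that is built and then summed.
import Mathlib
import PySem

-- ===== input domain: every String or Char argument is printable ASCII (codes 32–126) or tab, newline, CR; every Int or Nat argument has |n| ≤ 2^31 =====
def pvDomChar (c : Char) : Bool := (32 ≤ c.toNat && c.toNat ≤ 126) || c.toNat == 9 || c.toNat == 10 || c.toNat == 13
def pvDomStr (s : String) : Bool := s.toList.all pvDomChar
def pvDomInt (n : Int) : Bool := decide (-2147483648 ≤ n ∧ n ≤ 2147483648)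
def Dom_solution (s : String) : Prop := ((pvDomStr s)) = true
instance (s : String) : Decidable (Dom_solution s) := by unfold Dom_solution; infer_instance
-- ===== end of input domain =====

-- B replaces A's build-a-stack-then-sum with a single reverse pass keeping a
-- pending-cancellation counter and a running sum (same O(n) time, O(1) space).

-- ===== PORT A =====
-- for i in range(len(l)): indices are always in range, so pyGetD with default "" is exact.
def solution (s : String) : Int :=
  let l := ((PySem.Str.split? s " ").getD [])
  let stack : List Int := []
  let stack :=
    (PySem.List.pyRange 0 (PySem.List.len l) 1).foldl
      (fun (stack : List Int) i =>
        let t := PySem.List.pyGetD l i ""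
        if t = "Z" then
          if stack ≠ [] then stack.dropLast else stack   -- stack.pop()
        else
          stack ++ [(PySem.Int.ofStr? t).getD 0])        -- int(t); Pre_ guarantees it parses
      stack
  stack.sum

-- ===== PORT B =====
def solution_alt (s : String) : Int :=
  ((((PySem.Str.split? s " ").getD [])).reverse.foldl
      (fun (st : Int × Int) t =>
        if t = "Z" then (st.1 + 1, st.2)
        else
          let v := (PySem.Int.ofStr? t).getD 0           -- int(t); Pre_ guarantees it parses
          if st.1 > 0 then (st.1 - 1, st.2) else (st.1, st.2 + v))
      ((0 : Int), (0 : Int))).2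

-- ===== PRECONDITION & SPEC =====
-- Python A raises ValueError on int(t) for any token that is neither the cancel marker nor an int literal
-- (e.g. the empty token produced by adjacent spaces); Pre_ excludes exactly those inputs.
def Pre_solution (s : String) : Prop :=
  ∀ t ∈ ((PySem.Str.split? s " ").getD []), t = "Z" ∨ (PySem.Int.ofStr? t).isSome = true
instance (s : String) : Decidable (Pre_solution s) := by unfold Pre_solution; infer_instance

def pvWitness_solution : String := "1 2 Z 3"

def Spec_solution (s : String) (out : Int) : Prop := out = solution_alt s
instance (s : String) (out : Int) : Decidable (Spec_solution s out) := by unfold Spec_solution; infer_instance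

-- ===== CLAIM (what is proved, stated in full; the proofs are below) =====
def Claim_equal_solution : Prop := ∀ (s : String), Dom_solution s → Pre_solution s → Spec_solution s (solution s)

-- ===== LEMMAS AND PROOFS =====

-- A's loop body / B's loop body as named step functions
def stepA (stack : List Int) (t : String) : List Int :=
  if t = "Z" then (if stack ≠ [] then stack.dropLast else stack)
  else stack ++ [(PySem.Int.ofStr? t).getD 0]

def stepB (st : Int × Int) (t : String) : Int × Int :=
  if t = "Z" then (st.1 + 1, st.2)
  else
    let v := (PySem.Int.ofStr? t).getD 0
    if st.1 > 0 then (st.1 - 1, st.2) else (st.1, st.2 + v)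

-- the stack after removing its last k elements
def popN (st : List Int) (k : Nat) : List Int := st.take (st.length - k)

theorem popN_dropLast (st : List Int) (k : Nat) :
    popN st.dropLast k = popN st (k + 1) := by
  simp [popN, List.dropLast_eq_take, List.take_take, List.length_take]
  omega

theorem popN_append_singleton (st : List Int) (v : Int) (k : Nat) :
    popN (st ++ [v]) (k + 1) = popN st k := by
  unfold popN
  rw [List.length_append]
  simp only [List.length_cons, List.length_nil]
  rw [List.take_append_of_le_length (by omega)]
  congr 1
  omega

theorem stepA_Z (st : List Int) : stepA st "Z" = st.dropLast := by
  by_cases h : st = [] <;> simp [stepA, h]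

-- key invariant: the reverse fold with a skip counter computes the sum of the stack
-- with its last `skip` elements removed
theorem key (l : List String) :
    ∀ (skip ans : Int), 0 ≤ skip →
      (l.reverse.foldl stepB (skip, ans)).2
        = ans + (popN (l.foldl stepA []) skip.toNat).sum := by
  induction l using List.reverseRecOn with
  | nil => intro skip ans _; simp [popN]
  | append_singleton l t ih =>
    intro skip ans hskip
    rw [List.reverse_append, List.reverse_singleton, List.singleton_append,
        List.foldl_cons, List.foldl_append, List.foldl_cons, List.foldl_nil]
    by_cases hz : t = "Z"
    · subst hz
      have h1 : stepB (skip, ans) "Z" = (skip + 1, ans) := by simp [stepB]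
      rw [h1, ih (skip + 1) ans (by omega), stepA_Z, popN_dropLast,
          show (skip + 1).toNat = skip.toNat + 1 from by omega]
    · by_cases hp : skip > 0
      · have h1 : stepB (skip, ans) t = (skip - 1, ans) := by simp [stepB, hz, hp]
        rw [h1, ih (skip - 1) ans (by omega)]
        have h2 : stepA (l.foldl stepA []) t = l.foldl stepA [] ++ [(PySem.Int.ofStr? t).getD 0] := by
          simp [stepA, hz]
        rw [h2]
        have h3 : skip.toNat = (skip - 1).toNat + 1 := by omega
        rw [h3, popN_append_singleton]
      · have h0 : skip = 0 := by omega
        subst h0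
        have h1 : stepB (0, ans) t = (0, ans + (PySem.Int.ofStr? t).getD 0) := by
          simp [stepB, hz]
        rw [h1, ih 0 _ le_rfl]
        have h2 : stepA (l.foldl stepA []) t = l.foldl stepA [] ++ [(PySem.Int.ofStr? t).getD 0] := by
          simp [stepA, hz]
        rw [h2]
        simp [popN]
        ring

-- ===== VERDICT (by name: the statement is the Claim_ definition above) =====
theorem solution_spec : Claim_equal_solution := by
  intro s _ _
  show (List.foldl
      (fun (stack : List Int) i => stepA stack (PySem.List.pyGetD ((PySem.Str.split? s " ").getD []) i ""))
      [] (PySem.List.pyRange 0 (PySem.List.len ((PySem.Str.split? s " ").getD [])) 1)).sum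
    = ((((PySem.Str.split? s " ").getD []).reverse.foldl stepB ((0 : Int), (0 : Int)))).2
  rw [PySem.List.foldl_pyRange_zero_pyGetD ((PySem.Str.split? s " ").getD []) "" stepA []]
  rw [key ((PySem.Str.split? s " ").getD []) 0 0 le_rfl]
  simp [popN]
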